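-- pv_equiv track=rewrite | github.com/Ali4LFC/QazaqAir | backend/app/api/endpoints/air_quality.py | _localize_aqi_level
-- ===== SOURCE A (Python) =====
-- def _localize_aqi_level(aqi: int, lang: str) -> str:
--     levels = {
--         "ru": ["Хорошее", "Умеренное", "Вредно для чувствительных групп", "Вредное", "Очень вредное", "Опасное"],
--         "kk": ["Жақсы", "Орташа", "Сезімтал топтарға зиян", "Зиянды", "Өте зиянды", "Қауіпті"],
--         "en": ["Good", "Moderate", "Unhealthy for sensitive groups", "Unhealthy", "Very unhealthy", "Hazardous"],
--     }
--     bounds = [50, 100, 150, 200, 300]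
--     idx = 5
--     for i, bound in enumerate(bounds):
--         if aqi <= bound:
--             idx = i
--             break
--     return levels.get(lang, levels["ru"])[idx]
-- ===== SOURCE B (Python) =====
-- def _localize_aqi_level(aqi: int, lang: str) -> str:
--     levels = {
--         "ru": ["Хорошее", "Умеренное", "Вредно для чувствительных групп", "Вредное", "Очень вредное", "Опасное"],
--         "kk": ["Жақсы", "Орташа", "Сезімтал топтарға зиян", "Зиянды", "Өте зиянды", "Қауіпті"],
--         "en": ["Good", "Moderate", "Unhealthy for sensitive groups", "Unhealthy", "Very unhealthy", "Hazardous"],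
--     }
--     bounds = [50, 100, 150, 200, 300]
--     # hand-written bisect_left: first index lo with aqi <= bounds[lo], or 5
--     lo, hi = 0, len(bounds)
--     while lo < hi:
--         mid = (lo + hi) // 2
--         if bounds[mid] < aqi:
--             lo = mid + 1
--         else:
--             hi = mid
--     return levels.get(lang, levels["ru"])[lo]
-- ===== Notes on version B (the rewrite author's own statement) =====
-- stated objective: alternative
-- what changed: Replaces the linear break-on-first-match scan of the bounds list with a hand-written binary search (bisect_left) that returns the first index whose bound is >= aqi.
import Mathlib
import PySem

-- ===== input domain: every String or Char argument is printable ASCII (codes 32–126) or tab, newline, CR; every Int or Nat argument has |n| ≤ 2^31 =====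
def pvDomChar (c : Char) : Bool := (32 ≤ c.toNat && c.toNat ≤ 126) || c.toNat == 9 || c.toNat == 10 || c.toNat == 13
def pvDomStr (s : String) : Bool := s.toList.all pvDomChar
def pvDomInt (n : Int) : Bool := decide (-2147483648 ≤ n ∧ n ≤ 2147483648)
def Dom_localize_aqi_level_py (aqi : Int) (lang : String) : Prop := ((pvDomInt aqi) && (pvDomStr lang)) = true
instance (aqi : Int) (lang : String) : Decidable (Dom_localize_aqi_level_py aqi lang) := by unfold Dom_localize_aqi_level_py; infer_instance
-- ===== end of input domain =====

-- B replaces A's linear first-match scan of the bounds list with a hand-written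
-- binary search (bisect_left); same value on every input (objective: alternative).


def pvLevels : PySem.Dict String (List String) :=
  PySem.Dict.ofList [("ru", ["Хорошее", "Умеренное", "Вредно для чувствительных групп", "Вредное", "Очень вредное", "Опасное"]),
   ("kk", ["Жақсы", "Орташа", "Сезімтал топтарға зиян", "Зиянды", "Өте зиянды", "Қауіпті"]),
   ("en", ["Good", "Moderate", "Unhealthy for sensitive groups", "Unhealthy", "Very unhealthy", "Hazardous"])]

def pvBounds : List Int := [50, 100, 150, 200, 300]

-- A's for-loop with break: first i with aqi <= bound, else the initial idx
def pvScanIdx (l : List (Int × Int)) (aqi : Int) (idx : Int) : Int :=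
  match l with
  | [] => idx
  | (i, b) :: rest => if aqi ≤ b then i else pvScanIdx rest aqi idx

-- ===== PORT A =====
-- list indexing levels[...][idx] is always in range (idx ≤ 5), ported with getD
def localize_aqi_level_py (aqi : Int) (lang : String) : String :=
  let idx := pvScanIdx (PySem.List.enumerate pvBounds) aqi 5
  (PySem.Dict.getD pvLevels lang (PySem.Dict.getD pvLevels "ru" [])).getD idx.toNat ""

-- ===== PORT B =====
-- B's while-loop binary search (bisect_left)
def pvBisect (bounds : List Int) (aqi : Int) (lo hi : Nat) : Nat :=
  if _h : lo < hi then
    let mid := (lo + hi) / 2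
    if bounds.getD mid 0 < aqi then pvBisect bounds aqi (mid + 1) hi
    else pvBisect bounds aqi lo mid
  else lo
termination_by hi - lo
decreasing_by all_goals omega

def localize_aqi_level_py_alt (aqi : Int) (lang : String) : String :=
  let lo := pvBisect pvBounds aqi 0 pvBounds.length
  (PySem.Dict.getD pvLevels lang (PySem.Dict.getD pvLevels "ru" [])).getD lo ""

-- ===== PRECONDITION & SPEC =====
def Spec_localize_aqi_level_py (aqi : Int) (lang : String) (out : String) : Prop := out = localize_aqi_level_py_alt aqi lang
instance (aqi : Int) (lang : String) (out : String) : Decidable (Spec_localize_aqi_level_py aqi lang out) := by unfold Spec_localize_aqi_level_py; infer_instance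

-- ===== CLAIM (what is proved, stated in full; the proofs are below) =====
def Claim_equal_localize_aqi_level_py : Prop := ∀ (aqi : Int) (lang : String), Dom_localize_aqi_level_py aqi lang → Spec_localize_aqi_level_py aqi lang (localize_aqi_level_py aqi lang)

-- ===== LEMMAS AND PROOFS =====
theorem pvIdx_eq (aqi : Int) :
    pvScanIdx (PySem.List.enumerate pvBounds) aqi 5 = (pvBisect pvBounds aqi 0 pvBounds.length : Int) := by
  simp only [pvBounds, List.length]
  by_cases h1 : aqi ≤ 50 <;> by_cases h2 : aqi ≤ 100 <;> by_cases h3 : aqi ≤ 150 <;>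
    by_cases h4 : aqi ≤ 200 <;> by_cases h5 : aqi ≤ 300 <;>
    simp_all [pvScanIdx, pvBisect, List.getD] <;> omega

-- ===== VERDICT (by name: the statement is the Claim_ definition above) =====
theorem localize_aqi_level_py_spec : Claim_equal_localize_aqi_level_py := by
  intro aqi lang _
  unfold Spec_localize_aqi_level_py localize_aqi_level_py localize_aqi_level_py_alt
  rw [pvIdx_eq]
  simp
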